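-- pv_equiv track=rewrite | github.com/Tamerabdalrazaq/AVL-LIST | t_2.py | array_insert_first
-- ===== SOURCE A (Python) =====
-- def array_insert_first(n):
--     def _ins(index, v):
--         curr_rotations = arr.insert(index , v)
--         return curr_rotations
--     arr= []
--
--     for i in range(0, n):
--         index = 0
--         _ins(index, i)
--     return arr
-- ===== SOURCE B (Python) =====
-- def array_insert_first(n):
--     return list(range(n - 1, -1, -1))
-- ===== Notes on version B (the rewrite author's own statement) =====
-- stated objective: faster
-- what changed: B has no loop at all: it produces the result directly as the descending range list(range(n-1,-1,-1)) instead of repeatedly inserting at the front.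
import Mathlib
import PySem

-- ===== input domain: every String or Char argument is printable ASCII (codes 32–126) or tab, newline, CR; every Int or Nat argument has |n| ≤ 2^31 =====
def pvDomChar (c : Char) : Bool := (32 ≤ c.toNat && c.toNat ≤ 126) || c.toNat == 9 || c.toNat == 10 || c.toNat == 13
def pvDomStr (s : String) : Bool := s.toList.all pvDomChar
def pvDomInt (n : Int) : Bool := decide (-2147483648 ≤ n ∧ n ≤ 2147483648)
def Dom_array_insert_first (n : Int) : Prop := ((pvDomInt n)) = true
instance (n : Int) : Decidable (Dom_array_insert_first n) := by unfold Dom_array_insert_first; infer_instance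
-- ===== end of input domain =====

-- B replaces the quadratic front-insertion loop by the closed-form descending range list(range(n-1,-1,-1)).

-- ===== PORT A =====
def array_insert_first (n : Int) : List Int :=
  (PySem.List.pyRange 0 n 1).foldl (fun arr i => PySem.List.insert arr 0 i) []

-- ===== PORT B =====
def array_insert_first_alt (n : Int) : List Int :=
  PySem.List.pyRange (n - 1) (-1) (-1)

-- ===== PRECONDITION & SPEC =====
def Spec_array_insert_first (n : Int) (out : List Int) : Prop := out = array_insert_first_alt n
instance (n : Int) (out : List Int) : Decidable (Spec_array_insert_first n out) := by unfold Spec_array_insert_first; infer_instance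

-- ===== CLAIM =====
def Claim_equal_array_insert_first : Prop := ∀ (n : Int), Dom_array_insert_first n → Spec_array_insert_first n (array_insert_first n)

-- ===== LEMMAS AND PROOFS =====
theorem pv_foldl_insert_zero (l acc : List Int) :
    l.foldl (fun arr i => PySem.List.insert arr 0 i) acc = l.reverse ++ acc := by
  induction l generalizing acc with
  | nil => simp
  | cons x xs ih => rw [List.foldl, PySem.List.insert_zero, ih]; simp

-- ===== VERDICT =====
theorem array_insert_first_spec : Claim_equal_array_insert_first := by
  intro n _
  unfold Spec_array_insert_first array_insert_first array_insert_first_alt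
  rw [pv_foldl_insert_zero, PySem.List.pyRange_neg_one_eq_reverse]
  norm_num
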